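-- pv_equiv track=rewrite | github.com/shinlama/TIL | Algorithms/swea_5207_binary_search.py | search
-- ===== SOURCE A (Python) =====
-- def search(lst, n, target):
--     start = 0
--     end = n - 1
--     way = 0
--     while start <= end:
--         mid = (start + end) // 2
--         if lst[mid] == target:
--             return True
--         elif lst[mid] < target:
--             if way == 2:
--                 break
--             start = mid + 1
--             way = 2
--         else:
--             if way == 1:
--                 break
--             end = mid - 1
--             way = 1
--     return False
-- ===== SOURCE B (Python) =====
-- def search(lst, n, target):
--     # way-state defunctionalized into three mutually recursive helpers
--     def first(lo, hi):
--         if lo > hi: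
--             return False
--         m = (lo + hi) // 2
--         if lst[m] == target:
--             return True
--         if lst[m] < target:
--             return after_right(m + 1, hi)
--         return after_left(lo, m - 1)
--
--     def after_right(lo, hi):  # last move was right: another right move is forbidden
--         if lo > hi:
--             return False
--         m = (lo + hi) // 2
--         if lst[m] == target:
--             return True
--         if lst[m] < target:
--             return False
--         return after_left(lo, m - 1)
--
--     def after_left(lo, hi):  # last move was left: another left move is forbidden
--         if lo > hi:
--             return False
--         m = (lo + hi) // 2
--         if lst[m] == target:
--             return True
--         if lst[m] < target:
--             return after_right(m + 1, hi)
--         return False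
--
--     return first(0, n - 1)
-- ===== Notes on version B (the rewrite author's own statement) =====
-- stated objective: alternative
-- what changed: The while-loop with the mutable 'way' flag is replaced by three mutually recursive helpers (first/after_right/after_left), defunctionalizing the direction state into control flow; the 'way' variable and its == checks disappear.
-- outside the precondition, e.g. on search([5], 2, 5): A returns True, B returns True; on search([3], 2, 4): A raises IndexError, B raises IndexError
import Mathlib
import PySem

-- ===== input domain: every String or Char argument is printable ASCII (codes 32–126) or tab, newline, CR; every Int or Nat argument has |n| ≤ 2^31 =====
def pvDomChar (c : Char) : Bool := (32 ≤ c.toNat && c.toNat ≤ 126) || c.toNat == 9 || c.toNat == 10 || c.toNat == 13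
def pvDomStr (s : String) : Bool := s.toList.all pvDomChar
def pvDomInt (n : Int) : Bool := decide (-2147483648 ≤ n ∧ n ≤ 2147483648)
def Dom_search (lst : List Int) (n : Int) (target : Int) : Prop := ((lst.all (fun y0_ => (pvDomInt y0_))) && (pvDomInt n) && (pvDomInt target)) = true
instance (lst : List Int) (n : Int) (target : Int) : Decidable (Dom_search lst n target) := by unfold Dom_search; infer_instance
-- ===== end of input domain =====

-- B replaces A's while-loop with its mutable 'way' flag by three mutually recursive helpers
-- (direction state defunctionalized into control flow); same asymptotic cost, no speed claim.

-- ===== PORT A =====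
-- the while loop of A, state (start, end, way); pyGet? none = IndexError, outside Pre_search
def searchLoop (lst : List Int) (target start e way : Int) : Bool :=
  if h : start ≤ e then
    let mid := PySem.Int.floordiv (start + e) 2
    match PySem.List.pyGet? lst mid with
    | none => false
    | some v =>
      if v = target then true
      else if v < target then
        if way = 2 then false
        else searchLoop lst target (mid + 1) e 2
      else
        if way = 1 then false
        else searchLoop lst target start (mid - 1) 1
  else false
termination_by (e - start + 1).toNat
decreasing_by
  · have := PySem.Int.floordiv_two_mid_bounds h; omega
  · have := PySem.Int.floordiv_two_mid_bounds h; omega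

def search (lst : List Int) (n : Int) (target : Int) : Bool :=
  searchLoop lst target 0 (n - 1) 0

-- ===== PORT B =====
mutual
-- no move made yet: both directions allowed
def goFirst (lst : List Int) (target lo hi : Int) : Bool :=
  if _h : lo > hi then false
  else
    let m := PySem.Int.floordiv (lo + hi) 2
    match PySem.List.pyGet? lst m with
    | none => false
    | some v =>
      if v = target then true
      else if v < target then goAfterRight lst target (m + 1) hi
      else goAfterLeft lst target lo (m - 1)

-- last move was right: another right move is forbidden
def goAfterRight (lst : List Int) (target lo hi : Int) : Bool :=
  if _h : lo > hi then false
  else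
    let m := PySem.Int.floordiv (lo + hi) 2
    match PySem.List.pyGet? lst m with
    | none => false
    | some v =>
      if v = target then true
      else if v < target then false
      else goAfterLeft lst target lo (m - 1)
termination_by (hi - lo + 1).toNat
decreasing_by
  all_goals (have := PySem.Int.floordiv_two_mid_bounds (show lo ≤ hi by omega); omega)

-- last move was left: another left move is forbidden
def goAfterLeft (lst : List Int) (target lo hi : Int) : Bool :=
  if _h : lo > hi then false
  else
    let m := PySem.Int.floordiv (lo + hi) 2
    match PySem.List.pyGet? lst m with
    | none => false
    | some v =>
      if v = target then true
      else if v < target then goAfterRight lst target (m + 1) hi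
      else false
termination_by (hi - lo + 1).toNat
decreasing_by
  all_goals (have := PySem.Int.floordiv_two_mid_bounds (show lo ≤ hi by omega); omega)
end

def search_alt (lst : List Int) (n : Int) (target : Int) : Bool :=
  goFirst lst target 0 (n - 1)

-- ===== PRECONDITION & SPEC =====
-- Pre_search excludes n > len(lst): there A can raise IndexError (the probe sequence may reach an
-- index ≥ len(lst)); on a few such inputs A still returns (a probe hits target first) and B agrees there.
def Pre_search (lst : List Int) (n : Int) (target : Int) : Prop := n ≤ lst.length
instance (lst : List Int) (n : Int) (target : Int) : Decidable (Pre_search lst n target) := by unfold Pre_search; infer_instance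
def pvWitness_search : List Int × Int × Int := ([1, 3, 5, 7], 4, 5)

def Spec_search (lst : List Int) (n : Int) (target : Int) (out : Bool) : Prop := out = search_alt lst n target
instance (lst : List Int) (n : Int) (target : Int) (out : Bool) : Decidable (Spec_search lst n target out) := by unfold Spec_search; infer_instance

-- ===== CLAIM (what is proved, stated in full; the proofs are below) =====
def Claim_equal_search : Prop := ∀ (lst : List Int) (n : Int) (target : Int), Dom_search lst n target → Pre_search lst n target → Spec_search lst n target (search lst n target)

-- ===== LEMMAS AND PROOFS =====

-- the loop with way ∈ {0, 1, 2} equals the corresponding B helper, simultaneously by strong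
-- induction on the interval length
lemma loop_eq_go (lst : List Int) (target : Int) :
    ∀ (k : Nat) (s e : Int), (e - s + 1).toNat ≤ k →
      searchLoop lst target s e 0 = goFirst lst target s e ∧
      searchLoop lst target s e 1 = goAfterLeft lst target s e ∧
      searchLoop lst target s e 2 = goAfterRight lst target s e := by
  intro k
  induction k with
  | zero =>
    intro s e hk
    have hse : ¬ s ≤ e := by omega
    refine ⟨?_, ?_, ?_⟩ <;>
      first
      | (rw [searchLoop, goFirst]; simp [hse, show s > e by omega])
      | (rw [searchLoop, goAfterLeft]; simp [hse, show s > e by omega])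
      | (rw [searchLoop, goAfterRight]; simp [hse, show s > e by omega])
  | succ k ih =>
    intro s e hk
    by_cases hse : s ≤ e
    · have hmid := PySem.Int.floordiv_two_mid_bounds hse
      have hR := fun (h : ((e - (PySem.Int.floordiv (s + e) 2 + 1) + 1).toNat ≤ k)) =>
        (ih (PySem.Int.floordiv (s + e) 2 + 1) e h).2.2
      have hL := fun (h : ((PySem.Int.floordiv (s + e) 2 - 1 - s + 1).toNat ≤ k)) =>
        (ih s (PySem.Int.floordiv (s + e) 2 - 1) h).2.1
      refine ⟨?_, ?_, ?_⟩
      · rw [searchLoop, goFirst]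
        simp only [dif_pos hse, dif_neg (show ¬ s > e by omega)]
        cases hget : PySem.List.pyGet? lst (PySem.Int.floordiv (s + e) 2) with
        | none => rfl
        | some v =>
          by_cases hv : v = target
          · simp [hv]
          · by_cases hlt : v < target
            · simp only [if_neg hv, if_pos hlt, if_neg (show ¬ (0 : Int) = 2 by decide)]
              exact hR (by omega)
            · simp only [if_neg hv, if_neg hlt, if_neg (show ¬ (0 : Int) = 1 by decide)]
              exact hL (by omega)
      · rw [searchLoop, goAfterLeft]
        simp only [dif_pos hse, dif_neg (show ¬ s > e by omega)]
        cases hget : PySem.List.pyGet? lst (PySem.Int.floordiv (s + e) 2) with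
        | none => rfl
        | some v =>
          by_cases hv : v = target
          · simp [hv]
          · by_cases hlt : v < target
            · simp only [if_neg hv, if_pos hlt, if_neg (show ¬ (1 : Int) = 2 by decide)]
              exact hR (by omega)
            · simp [if_neg hv, if_neg hlt]
      · rw [searchLoop, goAfterRight]
        simp only [dif_pos hse, dif_neg (show ¬ s > e by omega)]
        cases hget : PySem.List.pyGet? lst (PySem.Int.floordiv (s + e) 2) with
        | none => rfl
        | some v =>
          by_cases hv : v = target
          · simp [hv]
          · by_cases hlt : v < target
            · simp [if_neg hv, if_pos hlt]
            · simp only [if_neg hv, if_neg hlt, if_neg (show ¬ (2 : Int) = 1 by decide)]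
              exact hL (by omega)
    · refine ⟨?_, ?_, ?_⟩ <;>
        first
        | (rw [searchLoop, goFirst]; simp [hse, show s > e by omega])
        | (rw [searchLoop, goAfterLeft]; simp [hse, show s > e by omega])
        | (rw [searchLoop, goAfterRight]; simp [hse, show s > e by omega])

-- ===== VERDICT (by name: the statement is the Claim_ definition above) =====
theorem search_spec : Claim_equal_search := by
  intro lst n target _ _
  unfold Spec_search search search_alt
  exact (loop_eq_go lst target (n - 1 - 0 + 1).toNat 0 (n - 1) le_rfl).1
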